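-- pv_equiv track=rewrite | github.com/zhancongc/PaperOverview | backend/services/review_generator.py | _extract_section_content
-- ===== SOURCE A (Python) =====
-- def _extract_section_content(content: str, title: str) -> str:
--     """从生成的内容中提取特定节"""
--     lines = content.split('\n')
--     section_lines = []
--     capturing = False
--     section_found = False
--
--     # 提取标题关键词（更宽松的匹配）
--     title_keywords = title.split()
--     # 至少匹配前两个关键词
--     main_keyword = title_keywords[0] if title_keywords else ""
--     second_keyword = title_keywords[1] if len(title_keywords) > 1 else ""
--
--     for i, line in enumerate(lines):
--         # 检查是否是目标节标题（更宽松的匹配）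
--         is_section_title = False
--
--         # 完全匹配
--         if f"## {title}" in line:
--             is_section_title = True
--         # 匹配主关键词
--         elif main_keyword and main_keyword in line and line.startswith('## '):
--             is_section_title = True
--         # 匹配前两个关键词
--         elif second_keyword and main_keyword in line and second_keyword in line and line.startswith('## '):
--             is_section_title = True
--
--         if is_section_title:
--             capturing = True
--             section_found = True
--             section_lines.append(line)
--             continue
--
--         # 检查是否到了下一个节
--         if capturing and line.startswith('## ') and title not in line:
--             # 如果新标题包含其他主体章节的关键词，则停止
--             if main_keyword and main_keyword not in line:
--                 break
--
--         if capturing: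
--             section_lines.append(line)
--
--     return '\n'.join(section_lines) if section_found else ""
-- ===== SOURCE B (Python) =====
-- def _extract_section_content(content: str, title: str) -> str:
--     """Right-to-left rewrite: one backward pass over the lines maintaining, for
--     each suffix, its section body (lines up to the first terminating header)
--     and the section found in it; no capturing/found flags, no break."""
--     lines = content.split('\n')
--     keywords = title.split()
--     main_keyword = keywords[0] if keywords else ""
--
--     def is_title(line):
--         return (f"## {title}" in line) or (
--             bool(main_keyword) and main_keyword in line and line.startswith('## ')
--         )
--
--     def stops(line):
--         return (line.startswith('## ') and title not in line
--                 and bool(main_keyword) and main_keyword not in line)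
--
--     found = None   # the section of the suffix already processed, if any
--     body = []      # lines of the suffix up to its first terminating header
--     for line in reversed(lines):
--         if is_title(line):
--             found = [line] + body
--         body = [] if stops(line) else [line] + body
--     return '\n'.join(found) if found is not None else ""
-- ===== Notes on version B (the rewrite author's own statement) =====
-- stated objective: alternative
-- what changed: Replaces A's forward scan with capturing/section_found flags and a break by a single backward pass over reversed(lines) that maintains, for each suffix, its body up to the first terminating header and the section found in it, building the output back-to-front with no flags and no break.
import Mathlib
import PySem

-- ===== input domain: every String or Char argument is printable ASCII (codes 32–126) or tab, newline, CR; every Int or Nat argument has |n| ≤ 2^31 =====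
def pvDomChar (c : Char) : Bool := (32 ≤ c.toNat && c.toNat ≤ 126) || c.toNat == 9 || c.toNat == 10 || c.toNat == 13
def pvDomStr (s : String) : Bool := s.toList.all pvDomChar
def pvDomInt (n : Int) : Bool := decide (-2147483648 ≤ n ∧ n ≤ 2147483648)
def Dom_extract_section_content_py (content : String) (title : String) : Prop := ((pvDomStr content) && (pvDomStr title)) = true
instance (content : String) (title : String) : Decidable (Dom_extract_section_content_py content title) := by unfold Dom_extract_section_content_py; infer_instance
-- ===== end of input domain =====

-- ===== PORT A =====
-- B replaces A's forward flag-driven scan with one backward pass maintaining (section found, body of the suffix); return values proved equal on Dom.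
-- helper: A's is_section_title if/elif chain, transliterated branch by branch
def pvIsSectionTitleA (title main second line : String) : Bool :=
  if PySem.Str.isIn (PySem.Str.join "" ["## ", title]) line then true
  else if main != "" && PySem.Str.isIn main line && PySem.Str.startswith line "## " then true
  else if second != "" && PySem.Str.isIn main line && PySem.Str.isIn second line
          && PySem.Str.startswith line "## " then true
  else false

-- helper: A's for-loop over lines with state (section_lines, capturing, section_found); break returns early
def pvLoopA (title main second : String) :
    List String → List String → Bool → Bool → List String × Bool
  | [], acc, _, found => (acc, found)
  | line :: rest, acc, capturing, found =>
    if pvIsSectionTitleA title main second line then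
      pvLoopA title main second rest (acc ++ [line]) true true
    else if capturing && PySem.Str.startswith line "## " && !(PySem.Str.isIn title line)
            && (main != "" && !(PySem.Str.isIn main line)) then
      (acc, found)  -- break
    else if capturing then pvLoopA title main second rest (acc ++ [line]) capturing found
    else pvLoopA title main second rest acc capturing found

def extract_section_content_py (content : String) (title : String) : String :=
  let lines := (PySem.Str.split? content "\n").getD []   -- sep is non-empty, split? never none
  let kws := PySem.Str.split₀ title
  let main := if kws = [] then "" else kws.getD 0 ""
  let second := if kws.length > 1 then kws.getD 1 "" else ""
  let r := pvLoopA title main second lines [] false false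
  if r.2 then PySem.Str.join "\n" r.1 else ""

-- ===== PORT B =====
-- helper: B's is_title predicate
def pvIsTitleB (title main line : String) : Bool :=
  PySem.Str.isIn (PySem.Str.join "" ["## ", title]) line ||
  (main != "" && PySem.Str.isIn main line && PySem.Str.startswith line "## ")

-- helper: B's stops predicate
def pvStopsB (title main line : String) : Bool :=
  PySem.Str.startswith line "## " && !(PySem.Str.isIn title line)
    && (main != "" && !(PySem.Str.isIn main line))

-- helper: the body of B's `for line in reversed(lines)` loop, updating (found, body)
def pvStepB (title main : String) (st : Option (List String) × List String) (line : String) :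
    Option (List String) × List String :=
  (if pvIsTitleB title main line then some (line :: st.2) else st.1,
   if pvStopsB title main line then [] else line :: st.2)

def extract_section_content_py_alt (content : String) (title : String) : String :=
  let lines := (PySem.Str.split? content "\n").getD []
  let kws := PySem.Str.split₀ title
  let main := if kws = [] then "" else kws.getD 0 ""
  let st := lines.reverse.foldl (pvStepB title main) (none, [])
  match st.1 with
  | none => ""
  | some ls => PySem.Str.join "\n" ls

-- ===== PRECONDITION & SPEC =====
def Spec_extract_section_content_py (content : String) (title : String) (out : String) : Prop := out = extract_section_content_py_alt content title
instance (content : String) (title : String) (out : String) : Decidable (Spec_extract_section_content_py content title out) := by unfold Spec_extract_section_content_py; infer_instance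

-- ===== CLAIM (what is proved, stated in full; the proofs are below) =====
def Claim_equal_extract_section_content_py : Prop := ∀ (content : String) (title : String), Dom_extract_section_content_py content title → Spec_extract_section_content_py content title (extract_section_content_py content title)

-- ===== LEMMAS AND PROOFS =====

-- proof-side abstractions: first title-matching line with its tail, and the body up to the first stopper
def pvFindTitleB (title main : String) : List String → Option (String × List String)
  | [] => none
  | line :: rest =>
    if pvIsTitleB title main line then some (line, rest) else pvFindTitleB title main rest

def pvBodyB (title main : String) : List String → List String
  | [] => []
  | line :: rest =>
    if pvStopsB title main line then [] else line :: pvBodyB title main rest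

-- B's backward fold computes exactly (first section if any, body of the whole list)
lemma scanB_eq (title main : String) (xs : List String) :
    xs.reverse.foldl (pvStepB title main) (none, [])
      = ((pvFindTitleB title main xs).map (fun p => p.1 :: pvBodyB title main p.2),
         pvBodyB title main xs) := by
  induction xs with
  | nil => simp [pvFindTitleB, pvBodyB]
  | cons line rest ih =>
    simp only [List.reverse_cons, List.foldl_append, List.foldl_cons, List.foldl_nil, ih]
    have hf : pvFindTitleB title main (line :: rest)
        = if pvIsTitleB title main line then some (line, rest)
          else pvFindTitleB title main rest := by rw [pvFindTitleB]
    have hb : pvBodyB title main (line :: rest)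
        = if pvStopsB title main line then [] else line :: pvBodyB title main rest := by
      rw [pvBodyB]
    rw [hf, hb]
    unfold pvStepB
    by_cases ht : pvIsTitleB title main line <;> simp [ht]

-- every token produced by Python's whitespace split() is a non-empty string
lemma split0_go_ne_nil (s cur : List Char) (acc : List (List Char)) (hacc : ∀ t ∈ acc, t ≠ [])
    (t : List Char) (ht : t ∈ PySem.Chars.split₀.go s cur acc) : t ≠ [] := by
  induction s generalizing cur acc with
  | nil =>
    unfold PySem.Chars.split₀.go at ht
    by_cases hc : cur.isEmpty
    · rw [if_pos hc, List.mem_reverse] at ht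
      exact hacc t ht
    · rw [if_neg hc, List.mem_reverse, List.mem_cons] at ht
      rcases ht with h | h
      · subst h; simp_all [List.isEmpty_iff]
      · exact hacc t h
  | cons c rest ih =>
    unfold PySem.Chars.split₀.go at ht
    by_cases hs : PySem.Chars.isspace c
    · rw [if_pos hs] at ht
      by_cases hc : cur.isEmpty
      · rw [if_pos hc] at ht
        exact ih [] acc hacc ht
      · rw [if_neg hc] at ht
        refine ih [] (cur.reverse :: acc) ?_ ht
        intro u hu
        rcases List.mem_cons.mp hu with h | h
        · subst h; simp_all [List.isEmpty_iff]
        · exact hacc u h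
    · rw [if_neg hs] at ht
      exact ih (c :: cur) acc hacc ht

lemma split0_mem_ne_nil (s : String) (t : String) (ht : t ∈ PySem.Str.split₀ s) : t ≠ "" := by
  simp only [PySem.Str.split₀, List.mem_map] at ht
  obtain ⟨cs, hcs, rfl⟩ := ht
  have h := split0_go_ne_nil s.toList [] [] (by simp) cs hcs
  intro hcontra
  apply h
  have : (String.ofList cs).toList = ("" : String).toList := by rw [hcontra]
  simpa using this

-- A's three-branch title test equals B's two-branch one, provided a non-empty second
-- keyword forces a non-empty first keyword (true for split() tokens)
lemma predAB (title main second line : String) (hms : second ≠ "" → main ≠ "") :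
    pvIsSectionTitleA title main second line = pvIsTitleB title main line := by
  unfold pvIsSectionTitleA pvIsTitleB
  cases h1 : PySem.Str.isIn (PySem.Str.join "" ["## ", title]) line <;>
  cases hm : PySem.Str.isIn main line <;>
  cases hs : PySem.Str.startswith line "## " <;>
  cases h2 : PySem.Str.isIn second line <;>
  by_cases hmn : main = "" <;>
  by_cases hsn : second = "" <;>
  simp_all [bne]

-- instantiated at the main/second keywords both ports compute from title
lemma pred_eq (title line : String) :
    pvIsSectionTitleA title
      (if PySem.Str.split₀ title = [] then "" else (PySem.Str.split₀ title).getD 0 "")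
      (if (PySem.Str.split₀ title).length > 1 then (PySem.Str.split₀ title).getD 1 "" else "")
      line
    = pvIsTitleB title
      (if PySem.Str.split₀ title = [] then "" else (PySem.Str.split₀ title).getD 0 "")
      line := by
  apply predAB
  intro hs2
  have hlen : (PySem.Str.split₀ title).length > 1 := by
    by_contra hl
    exact hs2 (by simp [hl])
  have hne : PySem.Str.split₀ title ≠ [] := by
    intro h; rw [h] at hlen; simp at hlen
  have hmem : (PySem.Str.split₀ title).getD 0 "" ∈ PySem.Str.split₀ title := by
    have h0 : 0 < (PySem.Str.split₀ title).length := by omega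
    rw [List.getD_eq_getElem _ "" h0]
    exact List.getElem_mem h0
  have := split0_mem_ne_nil title _ hmem
  simpa [hne] using this

-- once capturing, A appends exactly the lines of pvBodyB, stopping at the same header
lemma loopA_capturing (title main second : String) (rest acc : List String)
    (hpred : ∀ l, pvIsSectionTitleA title main second l = pvIsTitleB title main l) :
    pvLoopA title main second rest acc true true = (acc ++ pvBodyB title main rest, true) := by
  induction rest generalizing acc with
  | nil => simp [pvLoopA, pvBodyB]
  | cons line rest ih =>
    by_cases ht : pvIsSectionTitleA title main second line
    · have hstop : pvStopsB title main line = false := by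
        have hb : pvIsTitleB title main line = true := by rw [← hpred]; exact ht
        unfold pvIsTitleB at hb
        rcases Bool.or_eq_true_iff.mp hb with h | h
        · -- "## {title}" in line → title in line
          have hinf : PySem.Chars.isIn title.toList line.toList = true := by
            simp only [PySem.Str.isIn_eq] at h
            rw [PySem.Chars.isIn_iff_infix] at h ⊢
            refine List.IsInfix.trans ?_ h
            have hj : (PySem.Str.join "" ["## ", title]).toList
                = ['#', '#', ' '] ++ title.toList := by
              simp [PySem.Str.join, PySem.Chars.join, List.intercalate]
            rw [hj]
            exact (List.suffix_append _ _).isInfix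
          simp [pvStopsB, hinf]
        · have hm := h
          simp only [Bool.and_eq_true, PySem.Str.isIn_eq] at hm
          simp [pvStopsB, hm.1.2]
      simp only [pvLoopA, ht, if_true, pvBodyB, hstop]
      rw [ih]
      simp
    · simp only [pvLoopA, ht, Bool.true_and]
      by_cases hs : pvStopsB title main line
      · have : (PySem.Str.startswith line "## " && !PySem.Str.isIn title line
            && (main != "" && !PySem.Str.isIn main line)) = true := hs
        simp only [this, if_true, pvBodyB, hs]
        simp
      · have : (PySem.Str.startswith line "## " && !PySem.Str.isIn title line
            && (main != "" && !PySem.Str.isIn main line)) = false := by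
          simpa [pvStopsB] using hs
        simp only [this, pvBodyB, hs]
        rw [ih]
        simp

-- before any title line matches, A only scans; the first match starts the capturing phase
lemma loopA_search (title main second : String) (lines : List String)
    (hpred : ∀ l, pvIsSectionTitleA title main second l = pvIsTitleB title main l) :
    pvLoopA title main second lines [] false false
    = match pvFindTitleB title main lines with
      | none => ([], false)
      | some (hd, rest) => (hd :: pvBodyB title main rest, true) := by
  induction lines with
  | nil => simp [pvLoopA, pvFindTitleB]
  | cons line rest ih =>
    by_cases ht : pvIsSectionTitleA title main second line
    · have hb : pvIsTitleB title main line = true := by rw [← hpred]; exact ht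
      simp only [pvLoopA, ht, if_true, pvFindTitleB, hb]
      simpa using loopA_capturing title main second rest [line] hpred
    · have hb : pvIsTitleB title main line = false := by rw [← hpred]; simpa using ht
      simp only [pvLoopA, ht, Bool.false_and, pvFindTitleB, hb]
      exact ih

-- ===== VERDICT (by name: the statement is the Claim_ definition above) =====
theorem extract_section_content_py_spec : Claim_equal_extract_section_content_py := by
  intro content title _
  unfold Spec_extract_section_content_py
  unfold extract_section_content_py extract_section_content_py_alt
  simp only []
  rw [loopA_search title _ _ ((PySem.Str.split? content "\n").getD []) (fun l => pred_eq title l)]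
  rw [scanB_eq]
  cases pvFindTitleB title (if PySem.Str.split₀ title = [] then "" else (PySem.Str.split₀ title).getD 0 "")
      ((PySem.Str.split? content "\n").getD []) with
  | none => rfl
  | some p => cases p; rfl
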